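-- pv_equiv track=rewrite | github.com/EnormousHammer/Canoil-Portal | backend/usmca_hts_codes.py | is_hts_code_on_usmca
-- ===== SOURCE A (Python) =====
-- APPROVED_USMCA_HTS_CODES = {
--     # Petroleum Lubricating Greases - 2710.19.3500
--     '2710.19.3500': {
--         'description': 'Petroleum Lubricating Grease',
--         'products': ['MOV Extra', 'MOV Long Life', 'MOV LL', 'Anderol 86EP-2 Lubricating Grease']
--     },
--
--     # Petroleum Oils - 2710.19.3080
--     '2710.19.3080': {
--         'description': 'Petroleum Oils',
--         'products': ['Petro Canada Purity 2204', 'Petro Canada Spray Oil 10/13/15/22',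
--                      'Xiameter PMX 200', 'VanFlex DIDP Lube Oil', 'Naugalube-750',
--                      'Anderol 555 Synthetic Compressor/Vacuum Oil']
--     },
--
--     # Base Oils - 2710.19.4590
--     '2710.19.4590': {
--         'description': 'Base oils (Cansol, Canox)',
--         'products': ['Cansol 2, 35 & 70 base oil', 'Canox 02']
--     },
--
--     # Empty Metal Drums - 7310.10.0015
--     '7310.10.0015': {
--         'description': 'Empty Metal Drum',
--         'products': ['Empty Metal Drum']
--     },
--
--     # Heat Transfer Fluids - 3811.21.0000
--     '3811.21.0000': {
--         'description': 'Heat transfer fluids',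
--         'products': ['Duratherm Heat Transfer Systems Fluids']
--     },
--
--     # Fuel System Cleaning Solutions - 3811.90
--     '3811.90': {
--         'description': 'Fuel system cleaning solutions',
--         'products': ['Advantage Diesel Fuel System Cleaning Solution',
--                      'Advantage Petrol Fuel Systems Cleaning Solution']
--     },
--
--     # Engine Flush Solutions - 3403.19
--     '3403.19': {
--         'description': 'Engine flush and lubricating oils',
--         'products': ['Engine Flush Solution RDS Lubricating Oil']
--     },
--
--     # Biodegradable Greases - 3403.19.5000
--     '3403.19.5000': {
--         'description': 'Biodegradable greases',
--         'products': ['VSG Biodegradable Canola-Oil Based Grease']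
--     }
-- }
--
-- def is_hts_code_on_usmca(hts_code: str) -> bool:
--     """
--     Check if an HTS code is approved on the USMCA certificate
--
--     Args:
--         hts_code: The HTS code to check
--
--     Returns:
--         True if the HTS code is on the USMCA certificate, False otherwise
--     """
--     if not hts_code:
--         return False
--
--     # Clean the HTS code
--     cleaned_code = str(hts_code).strip()
--
--     # Check exact match
--     if cleaned_code in APPROVED_USMCA_HTS_CODES:
--         return True
--
--     # Check partial match (some codes may have additional digits)
--     for approved_code in APPROVED_USMCA_HTS_CODES.keys():
--         if cleaned_code.startswith(approved_code):
--             return True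
--
--     return False
-- ===== SOURCE B (Python) =====
-- # B: instead of scanning the approved dict's keys with startswith, keep only the
-- # approved code strings in a frozenset and walk the cleaned input once, growing a
-- # prefix character by character and testing set membership at each step
-- # (only up to the longest approved code's length: longer prefixes cannot be in the set).
-- APPROVED_USMCA_PREFIXES = frozenset({
--     '2710.19.3500', '2710.19.3080', '2710.19.4590', '7310.10.0015',
--     '3811.21.0000', '3811.90', '3403.19', '3403.19.5000',
-- })
-- _MAX_PREFIX_LEN = max(map(len, APPROVED_USMCA_PREFIXES))
--
-- def is_hts_code_on_usmca(hts_code: str) -> bool: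
--     """Check if an HTS code is approved on the USMCA certificate."""
--     if not hts_code:
--         return False
--     cleaned_code = str(hts_code).strip()
--     prefix = ""
--     for ch in cleaned_code[:_MAX_PREFIX_LEN]:
--         prefix += ch
--         if prefix in APPROVED_USMCA_PREFIXES:
--             return True
--     return False
-- ===== Notes on version B (the rewrite author's own statement) =====
-- stated objective: alternative
-- what changed: B drops the dict and the per-key startswith scan: it keeps just the approved code strings in a frozenset and walks the cleaned input (capped at the longest approved code's length) once, growing a prefix one character at a time and testing set membership at each step.
import Mathlib
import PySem

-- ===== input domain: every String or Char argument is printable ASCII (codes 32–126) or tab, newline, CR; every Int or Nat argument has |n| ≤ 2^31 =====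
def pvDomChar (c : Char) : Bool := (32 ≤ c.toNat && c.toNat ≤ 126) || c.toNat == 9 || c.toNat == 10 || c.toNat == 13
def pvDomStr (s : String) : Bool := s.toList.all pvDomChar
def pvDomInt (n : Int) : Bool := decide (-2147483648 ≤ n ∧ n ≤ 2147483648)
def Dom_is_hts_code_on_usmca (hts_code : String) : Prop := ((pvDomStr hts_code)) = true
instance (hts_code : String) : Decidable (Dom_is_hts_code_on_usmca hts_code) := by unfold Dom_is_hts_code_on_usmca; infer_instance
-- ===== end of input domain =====

-- B drops the dict and the per-key startswith scan: it keeps only the approved code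
-- strings in a set and walks the cleaned input once, growing a prefix character by
-- character and testing set membership at each step (alternative decomposition).

-- ===== PORT A =====
-- the module-level dict APPROVED_USMCA_HTS_CODES
def pvApproved : PySem.Dict String (String × List String) :=
  PySem.Dict.ofList [
    ("2710.19.3500", ("Petroleum Lubricating Grease",
      ["MOV Extra", "MOV Long Life", "MOV LL", "Anderol 86EP-2 Lubricating Grease"])),
    ("2710.19.3080", ("Petroleum Oils",
      ["Petro Canada Purity 2204", "Petro Canada Spray Oil 10/13/15/22",
       "Xiameter PMX 200", "VanFlex DIDP Lube Oil", "Naugalube-750",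
       "Anderol 555 Synthetic Compressor/Vacuum Oil"])),
    ("2710.19.4590", ("Base oils (Cansol, Canox)",
      ["Cansol 2, 35 & 70 base oil", "Canox 02"])),
    ("7310.10.0015", ("Empty Metal Drum", ["Empty Metal Drum"])),
    ("3811.21.0000", ("Heat transfer fluids", ["Duratherm Heat Transfer Systems Fluids"])),
    ("3811.90", ("Fuel system cleaning solutions",
      ["Advantage Diesel Fuel System Cleaning Solution",
       "Advantage Petrol Fuel Systems Cleaning Solution"])),
    ("3403.19", ("Engine flush and lubricating oils", ["Engine Flush Solution RDS Lubricating Oil"])),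
    ("3403.19.5000", ("Biodegradable greases", ["VSG Biodegradable Canola-Oil Based Grease"]))]

-- A's for-loop over APPROVED_USMCA_HTS_CODES.keys() with early return
def pvKeysLoop (c : String) : List String → Bool
  | [] => false
  | k :: rest => if PySem.Str.startswith c k then true else pvKeysLoop c rest

def is_hts_code_on_usmca (hts_code : String) : Bool :=
  if hts_code = "" then false
  else
    let cleaned := PySem.Str.strip hts_code
    if pvApproved.contains cleaned then true
    else pvKeysLoop cleaned pvApproved.keys

-- ===== PORT B =====
-- B's own module constant: the frozenset of approved codes (a PySem set = distinct list)
def pvAltPrefixes : PySem.Set String :=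
  PySem.Set.ofList
    ["2710.19.3500", "2710.19.3080", "2710.19.4590", "7310.10.0015",
     "3811.21.0000", "3811.90", "3403.19", "3403.19.5000"]

-- Python: _MAX_PREFIX_LEN = max(map(len, APPROVED_USMCA_PREFIXES)); the set is nonempty, so
-- Python's max returns (the .getD 0 default is unreachable)
def pvMaxPrefixLen : Int :=
  (PySem.List.max? (pvAltPrefixes.map (fun k => PySem.Str.len k)) (fun x => x)).getD 0

-- B's for-loop: grow 'prefix' one char at a time, test membership each step
def pvScan (acc : List Char) : List Char → Bool
  | [] => false
  | c :: rest =>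
      let acc' := acc ++ [c]
      if pvAltPrefixes.contains (String.ofList acc') then true else pvScan acc' rest

def is_hts_code_on_usmca_alt (hts_code : String) : Bool :=
  if hts_code = "" then false
  else pvScan [] (PySem.Str.slice (PySem.Str.strip hts_code) none (some pvMaxPrefixLen)).toList

-- ===== PRECONDITION & SPEC =====
def Spec_is_hts_code_on_usmca (hts_code : String) (out : Bool) : Prop := out = is_hts_code_on_usmca_alt hts_code
instance (hts_code : String) (out : Bool) : Decidable (Spec_is_hts_code_on_usmca hts_code out) := by unfold Spec_is_hts_code_on_usmca; infer_instance

-- ===== CLAIM =====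
def Claim_equal_is_hts_code_on_usmca : Prop := ∀ (hts_code : String), Dom_is_hts_code_on_usmca hts_code → Spec_is_hts_code_on_usmca hts_code (is_hts_code_on_usmca hts_code)

-- ===== LEMMAS AND PROOFS =====

-- the approved code strings, concretely (A's dict keys and B's set hold the same)
def pvKS : List String :=
  ["2710.19.3500", "2710.19.3080", "2710.19.4590", "7310.10.0015",
   "3811.21.0000", "3811.90", "3403.19", "3403.19.5000"]

lemma pvApproved_keys : pvApproved.keys = pvKS := by rfl

lemma pvApproved_contains (s : String) :
    pvApproved.contains s = pvKS.any (fun k => k == s) := by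
  rw [← pvApproved_keys]
  show pvApproved.items.any (fun p => p.1 == s)
      = (pvApproved.items.map (fun p => p.1)).any (fun k => k == s)
  simp only [List.any_map, Function.comp_def]

lemma pvContains_iff (s : String) : pvApproved.contains s = true ↔ s ∈ pvKS := by
  rw [pvApproved_contains]
  constructor
  · intro h
    obtain ⟨k, hk, he⟩ := List.any_eq_true.mp h
    exact (beq_iff_eq.mp he) ▸ hk
  · intro hs
    exact List.any_eq_true.mpr ⟨s, hs, beq_iff_eq.mpr rfl⟩

lemma pvAlt_contains_iff (s : String) : pvAltPrefixes.contains s = true ↔ s ∈ pvKS := by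
  have h : pvAltPrefixes = pvKS := by decide
  rw [h]
  simp [PySem.Set.contains]

lemma pvKeysLoop_eq_any (c : String) (ks : List String) :
    pvKeysLoop c ks = ks.any (fun k => PySem.Str.startswith c k) := by
  induction ks with
  | nil => rfl
  | cons k rest ih => cases h : PySem.Str.startswith c k <;> simp [pvKeysLoop, ih]

lemma pvKS_nonempty : ∀ k ∈ pvKS, 1 ≤ k.toList.length := by decide

lemma pvKS_le12 : ∀ k ∈ pvKS, k.toList.length ≤ 12 := by decide

lemma pvMaxPrefixLen_eq : pvMaxPrefixLen = 12 := by decide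

lemma pvScan_iff (cs : List Char) : ∀ acc,
    pvScan acc cs = true ↔
      ∃ n, 0 < n ∧ n ≤ cs.length ∧ String.ofList (acc ++ cs.take n) ∈ pvKS := by
  induction cs with
  | nil =>
      intro acc
      simp [pvScan]
  | cons c rest ih =>
      intro acc
      simp only [pvScan]
      by_cases h : pvAltPrefixes.contains (String.ofList (acc ++ [c])) = true
      · rw [if_pos h]
        constructor
        · intro _
          exact ⟨1, one_pos, by simp, by simpa using (pvAlt_contains_iff _).mp h⟩
        · intro _; rfl
      · rw [if_neg h, ih]
        constructor
        · rintro ⟨n, hn0, hnl, hmem⟩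
          exact ⟨n + 1, by omega, by simpa using hnl, by
            simpa [List.take_succ_cons, List.append_assoc] using hmem⟩
        · rintro ⟨n, hn0, hnl, hmem⟩
          rcases n with _ | n
          · omega
          rcases n with _ | m
          · exact absurd ((pvAlt_contains_iff _).mpr (by simpa using hmem)) h
          · refine ⟨m + 1, by omega, ?_, ?_⟩
            · simp at hnl; omega
            · simpa [List.take_succ_cons, List.append_assoc] using hmem

lemma pvMain (c : String) :
    (if pvApproved.contains c then true else pvKeysLoop c pvApproved.keys)
      = pvScan [] (PySem.Str.slice c none (some pvMaxPrefixLen)).toList := by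
  have hsl : (PySem.Str.slice c none (some pvMaxPrefixLen)).toList = c.toList.take 12 := by
    rw [pvMaxPrefixLen_eq]
    simp [PySem.List.slice_to _ (by norm_num : (0:Int) ≤ 12)]
  rw [hsl, pvApproved_keys, pvKeysLoop_eq_any, Bool.if_true_left, Bool.eq_iff_iff]
  rw [pvScan_iff]
  simp only [Bool.or_eq_true, decide_eq_true_eq, List.any_eq_true, List.nil_append,
    List.length_take, List.take_take]
  constructor
  · rintro (hc | ⟨k, hk, hs⟩)
    · have hc' : c ∈ pvKS := (pvContains_iff c).mp hc
      have h12 := pvKS_le12 c hc'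
      refine ⟨c.toList.length, pvKS_nonempty c hc', by omega, ?_⟩
      rw [min_eq_left h12, List.take_length, String.ofList_toList]
      exact hc'
    · have hpre : k.toList <+: c.toList := by
        have := hs
        rw [PySem.Str.startswith_eq, PySem.Chars.startswith_iff] at this
        exact this
      have h12 := pvKS_le12 k hk
      have hle := hpre.length_le
      refine ⟨k.toList.length, pvKS_nonempty k hk, by omega, ?_⟩
      rw [min_eq_left h12, ← List.prefix_iff_eq_take.mp hpre, String.ofList_toList]
      exact hk
  · rintro ⟨n, hn0, hnl, hmem⟩
    rw [min_eq_left (by omega : n ≤ 12)] at hmem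
    right
    refine ⟨String.ofList (c.toList.take n), hmem, ?_⟩
    rw [PySem.Str.startswith_eq, PySem.Chars.startswith_iff, String.toList_ofList]
    exact List.take_prefix _ _

-- ===== VERDICT =====
theorem is_hts_code_on_usmca_spec : Claim_equal_is_hts_code_on_usmca := by
  intro hts_code _
  unfold Spec_is_hts_code_on_usmca is_hts_code_on_usmca is_hts_code_on_usmca_alt
  by_cases h : hts_code = ""
  · simp [h]
  · simp only [h, if_false]
    exact pvMain (PySem.Str.strip hts_code)
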